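-- pv_equiv track=rewrite | github.com/umigv/UMARV-CV-ScenePerception | linearize/linearize.py | split_by_discontinuity
-- ===== SOURCE A (Python) =====
-- def split_by_discontinuity(lst, threshold=1):
--     """Split the list if there is a discontinuity, helpful for later positional analysis."""
--     if not lst:
--         return []
--
--     # Initialize the first sublist
--     sublists = [[lst[0]]]
--
--     for i in range(1, len(lst)):
--         # Check if the difference between consecutive elements exceeds the threshold
--         if abs(lst[i] - lst[i - 1]) > threshold:
--             # Start a new sublist
--             sublists.append([lst[i]])
--         else:
--             # Append to the current sublist
--             sublists[-1].append(lst[i])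
--
--     return sublists
-- ===== SOURCE B (Python) =====
-- def split_by_discontinuity(lst, threshold=1):
--     """Split the list if there is a discontinuity, helpful for later positional analysis."""
--     if not lst:
--         return []
--     cuts = [i for i in range(1, len(lst)) if abs(lst[i] - lst[i - 1]) > threshold]
--     bounds = [0] + cuts + [len(lst)]
--     return [lst[a:b] for a, b in zip(bounds, bounds[1:])]
-- ===== Notes on version B (the rewrite author's own statement) =====
-- stated objective: alternative
-- what changed: B first collects the cut indices in one pass, then builds the result by slicing between consecutive boundaries, instead of incrementally appending to the last sublist.
import Mathlib
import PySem

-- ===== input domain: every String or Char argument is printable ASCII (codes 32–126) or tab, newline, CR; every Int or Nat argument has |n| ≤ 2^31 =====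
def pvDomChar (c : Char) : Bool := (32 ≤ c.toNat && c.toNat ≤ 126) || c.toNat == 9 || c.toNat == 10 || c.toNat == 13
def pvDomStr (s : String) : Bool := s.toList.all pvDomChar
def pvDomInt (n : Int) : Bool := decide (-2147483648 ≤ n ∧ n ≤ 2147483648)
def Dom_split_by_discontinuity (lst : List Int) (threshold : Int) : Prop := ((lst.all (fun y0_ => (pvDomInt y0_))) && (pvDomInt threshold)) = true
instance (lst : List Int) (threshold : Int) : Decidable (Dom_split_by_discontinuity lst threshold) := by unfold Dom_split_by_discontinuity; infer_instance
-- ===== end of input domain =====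

-- B builds the cut-index list first and then slices between consecutive boundaries (alternative decomposition, same cost).

-- ===== PORT A =====
-- sublists[-1].append(x): append x to the last sublist (A never calls it on [])
def pvAppendLast (xss : List (List Int)) (x : Int) : List (List Int) :=
  match xss with
  | [] => []
  | [ys] => [ys ++ [x]]
  | ys :: rest => ys :: pvAppendLast rest x

def split_by_discontinuity (lst : List Int) (threshold : Int) : List (List Int) :=
  if lst = [] then []
  else
    (PySem.List.pyRange 1 (lst.length : Int) 1).foldl
      (fun sublists i =>
        if |PySem.List.pyGetD lst i 0 - PySem.List.pyGetD lst (i-1) 0| > threshold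
        then sublists ++ [[PySem.List.pyGetD lst i 0]]
        else pvAppendLast sublists (PySem.List.pyGetD lst i 0))
      [[PySem.List.pyGetD lst 0 0]]

-- ===== PORT B =====
def split_by_discontinuity_alt (lst : List Int) (threshold : Int) : List (List Int) :=
  if lst = [] then []
  else
    let cuts := (PySem.List.pyRange 1 (lst.length : Int) 1).filter
      (fun i => decide (|PySem.List.pyGetD lst i 0 - PySem.List.pyGetD lst (i-1) 0| > threshold))
    let bounds := 0 :: (cuts ++ [(lst.length : Int)])
    (bounds.zip (PySem.List.slice bounds (some 1) none)).map
      (fun p => PySem.List.slice lst (some p.1) (some p.2))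

-- ===== PRECONDITION & SPEC =====
def Spec_split_by_discontinuity (lst : List Int) (threshold : Int) (out : List (List Int)) : Prop := out = split_by_discontinuity_alt lst threshold
instance (lst : List Int) (threshold : Int) (out : List (List Int)) : Decidable (Spec_split_by_discontinuity lst threshold out) := by unfold Spec_split_by_discontinuity; infer_instance

-- ===== CLAIM (what is proved, stated in full; the proofs are below) =====
def Claim_equal_split_by_discontinuity : Prop := ∀ (lst : List Int) (threshold : Int), Dom_split_by_discontinuity lst threshold → Spec_split_by_discontinuity lst threshold (split_by_discontinuity lst threshold)

-- ===== LEMMAS AND PROOFS =====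

-- slices between consecutive boundaries a :: cs ++ [stop]
def segsAux (lst : List Int) (a : Int) (cs : List Int) (stop : Int) : List (List Int) :=
  match cs with
  | [] => [PySem.List.slice lst (some a) (some stop)]
  | c :: cs' => PySem.List.slice lst (some a) (some c) :: segsAux lst c cs' stop

lemma zip_map_eq_segsAux (lst : List Int) (a stop : Int) (cs : List Int) :
    (((a :: (cs ++ [stop])).zip (cs ++ [stop])).map
      (fun p => PySem.List.slice lst (some p.1) (some p.2))) = segsAux lst a cs stop := by
  induction cs generalizing a with
  | nil => simp [segsAux]
  | cons c cs' ih => simpa [segsAux, List.zip] using ih c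

lemma segsAux_ne_nil (lst : List Int) (a : Int) (cs : List Int) (stop : Int) :
    segsAux lst a cs stop ≠ [] := by
  cases cs <;> simp [segsAux]

lemma pvAppendLast_cons (y : List Int) (l : List (List Int)) (x : Int) (h : l ≠ []) :
    pvAppendLast (y :: l) x = y :: pvAppendLast l x := by
  cases l with
  | nil => exact absurd rfl h
  | cons z zs => rfl

lemma slice_snoc (lst : List Int) (a m : Int) (ha : 0 ≤ a) (ham : a ≤ m)
    (hm : m < (lst.length : Int)) :
    PySem.List.slice lst (some a) (some m) ++ [PySem.List.pyGetD lst m 0]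
      = PySem.List.slice lst (some a) (some (m + 1)) := by
  have h0m : (0:Int) ≤ m := le_trans ha ham
  rw [PySem.List.slice_toNat lst ha h0m,
      PySem.List.slice_toNat lst ha (show (0:Int) ≤ m+1 by omega),
      PySem.List.pyGetD_of_nonneg lst 0 h0m]
  have hmlt : m.toNat < lst.length := by omega
  have hle : a.toNat ≤ m.toNat := by omega
  have h1 : (m+1).toNat = m.toNat + 1 := by omega
  rw [h1]
  have hdl : m.toNat - a.toNat < (lst.drop a.toNat).length := by
    simp [List.length_drop]; omega
  rw [Nat.succ_sub hle, List.take_add_one]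
  have : (lst.drop a.toNat)[m.toNat - a.toNat]? = some (lst.getD m.toNat 0) := by
    rw [List.getElem?_eq_getElem hdl]
    congr 1
    rw [List.getElem_drop, List.getD_eq_getElem lst 0 hmlt]
    congr 1
    omega
  rw [this]
  rfl

lemma slice_single (lst : List Int) (m : Int) (h0 : 0 ≤ m) (hm : m < (lst.length : Int)) :
    PySem.List.slice lst (some m) (some (m + 1)) = [PySem.List.pyGetD lst m 0] := by
  have := slice_snoc lst m m h0 le_rfl hm
  rw [← this, PySem.List.slice_toNat lst h0 h0]
  simp

lemma segsAux_snoc (lst : List Int) (a m stop : Int) (cs : List Int) :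
    segsAux lst a (cs ++ [m]) stop
      = segsAux lst a cs m ++ [PySem.List.slice lst (some m) (some stop)] := by
  induction cs generalizing a with
  | nil => simp [segsAux]
  | cons c cs' ih => simp [segsAux, ih]

lemma appendLast_segsAux (lst : List Int) (m : Int) (hm : m < (lst.length : Int)) :
    ∀ (cs : List Int) (a : Int), 0 ≤ a → a ≤ m → (∀ c ∈ cs, 0 ≤ c ∧ c ≤ m) →
    pvAppendLast (segsAux lst a cs m) (PySem.List.pyGetD lst m 0)
      = segsAux lst a cs (m + 1) := by
  intro cs
  induction cs with
  | nil =>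
    intro a ha ham _
    simp only [segsAux, pvAppendLast]
    rw [slice_snoc lst a m ha ham hm]
  | cons c cs' ih =>
    intro a ha ham hcs
    have hc := hcs c (by simp)
    simp only [segsAux]
    rw [pvAppendLast_cons _ _ _ (segsAux_ne_nil lst c cs' m)]
    rw [ih c hc.1 hc.2 (fun x hx => hcs x (by simp [hx]))]

-- the loop invariant: after processing indices 1..m-1, A's state is B's slices of the prefix cut list
lemma loop_eq (lst : List Int) (threshold : Int) :
    ∀ (m : Nat), 1 ≤ m → m ≤ lst.length →
    (PySem.List.pyRange 1 (m : Int) 1).foldl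
      (fun sublists i =>
        if |PySem.List.pyGetD lst i 0 - PySem.List.pyGetD lst (i-1) 0| > threshold
        then sublists ++ [[PySem.List.pyGetD lst i 0]]
        else pvAppendLast sublists (PySem.List.pyGetD lst i 0))
      [[PySem.List.pyGetD lst 0 0]]
      = segsAux lst 0
          ((PySem.List.pyRange 1 (m : Int) 1).filter
            (fun i => decide (|PySem.List.pyGetD lst i 0 - PySem.List.pyGetD lst (i-1) 0| > threshold)))
          (m : Int) := by
  intro m
  induction m with
  | zero => omega
  | succ m ih =>
    intro _ hle
    by_cases hm1 : 1 ≤ m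
    · -- m ≥ 1: split the range at m
      have hcast : ((m + 1 : Nat) : Int) = (m : Int) + 1 := by push_cast; ring
      have hrange : PySem.List.pyRange 1 ((m+1 : Nat) : Int) 1
          = PySem.List.pyRange 1 (m : Int) 1 ++ [(m : Int)] := by
        rw [hcast, PySem.List.pyRange_one_succ_right (show (1:Int) ≤ (m:Int) by exact_mod_cast hm1)]
      have hmem : ∀ c ∈ (PySem.List.pyRange 1 (m : Int) 1).filter
            (fun i => decide (|PySem.List.pyGetD lst i 0 - PySem.List.pyGetD lst (i-1) 0| > threshold)),
          (0:Int) ≤ c ∧ c ≤ (m : Int) := by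
        intro c hc
        have := (PySem.List.mem_pyRange_one).1 (List.mem_of_mem_filter hc)
        omega
      have hmlt : (m : Int) < (lst.length : Int) := by exact_mod_cast hle
      rw [hrange, List.foldl_append, List.filter_append, ih hm1 (by omega), hcast]
      simp only [List.foldl_cons, List.foldl_nil, List.filter_cons, List.filter_nil]
      by_cases hcond : |PySem.List.pyGetD lst (m : Int) 0 - PySem.List.pyGetD lst ((m : Int)-1) 0| > threshold
      · rw [if_pos hcond]
        simp only [hcond, decide_true, if_true]
        rw [segsAux_snoc, slice_single lst (m : Int) (by positivity) hmlt]
      · rw [if_neg hcond]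
        simp only [hcond, decide_false, Bool.false_eq_true, if_false, List.append_nil]
        exact appendLast_segsAux lst (m : Int) hmlt _ 0 le_rfl (by positivity) hmem
    · -- m = 0: both sides are the initial state / the single whole-prefix slice
      have hm0 : m = 0 := by omega
      subst hm0
      have h1 : lst ≠ [] := by intro h; subst h; simp at hle
      rw [show ((0 + 1 : Nat) : Int) = 1 by norm_num,
          PySem.List.pyRange_one_eq_nil (le_refl (1:Int))]
      simp only [List.foldl_nil, List.filter_nil, segsAux]
      rw [PySem.List.slice_toNat lst (le_refl (0:Int)) zero_le_one,
          PySem.List.pyGetD_of_nonneg lst 0 (le_refl (0:Int))]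
      cases lst with
      | nil => exact absurd rfl h1
      | cons x xs => simp

-- ===== VERDICT (by name: the statement is the Claim_ definition above) =====
theorem split_by_discontinuity_spec : Claim_equal_split_by_discontinuity := by
  intro lst threshold _
  unfold Spec_split_by_discontinuity split_by_discontinuity split_by_discontinuity_alt
  by_cases h : lst = []
  · simp [h]
  · rw [if_neg h, if_neg h]
    have hlen : 1 ≤ lst.length := by
      cases lst with
      | nil => exact absurd rfl h
      | cons x xs => simp
    dsimp only
    rw [PySem.List.slice_from_one, loop_eq lst threshold lst.length hlen le_rfl,
        ← zip_map_eq_segsAux]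
    rfl
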